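-- pv_equiv track=rewrite | github.com/taeyang121096/Coding_Test_Study | taeyang/Python/Hash/coding_1.py | solution
-- ===== SOURCE A (Python) =====
-- def solution(participant, completion):
--     answer = ''
--
--     maraton = dict()
--     '''참가자들을 계속해서 추가해준다 (key : 참가자 이름 value : 명수(동명이인이 있을 수도 있기 때문)'''
--     for i in participant:
--         if i in maraton:
--             maraton[i] += 1
--         else:
--             maraton[i] = 1
--     '''완주자 넣고'''
--
--     for j in completion:
--         if maraton[j] == 1:
--             del maraton[j]
--         else:
--             maraton[j] -= 1
--     answer = list(maraton.keys())[0]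
--     return answer
-- ===== SOURCE B (Python) =====
-- def solution(participant, completion):
--     # subtract the completion multiset from the participant list, then return
--     # the first participant who is still unaccounted for
--     leftovers = list(participant)
--     for name in completion:
--         leftovers.remove(name)
--     return next(p for p in participant if p in leftovers)
-- ===== Notes on version B (the rewrite author's own statement) =====
-- stated objective: simpler
-- what changed: Replaces A's hash-multiset bookkeeping (build a name->count dict, decrement or delete per completion, take the first remaining dict key) with plain list subtraction: remove each completion from a copy of participant, then return the first participant still present in the leftovers.
import Mathlib
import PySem

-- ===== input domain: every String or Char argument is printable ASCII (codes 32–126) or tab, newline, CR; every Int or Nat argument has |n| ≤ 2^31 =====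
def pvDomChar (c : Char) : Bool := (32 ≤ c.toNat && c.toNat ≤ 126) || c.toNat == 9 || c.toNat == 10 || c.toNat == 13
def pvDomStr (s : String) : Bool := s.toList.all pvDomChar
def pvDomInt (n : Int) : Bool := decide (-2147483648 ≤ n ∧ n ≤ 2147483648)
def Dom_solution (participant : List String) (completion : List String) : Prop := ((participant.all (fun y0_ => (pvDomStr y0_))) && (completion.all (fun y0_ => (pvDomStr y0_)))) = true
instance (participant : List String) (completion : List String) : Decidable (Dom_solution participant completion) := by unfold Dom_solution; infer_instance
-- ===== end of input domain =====

-- B replaces A's hash-multiset bookkeeping (build a name→count dict, decrement or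
-- delete per completion, take the first remaining key) by plain list subtraction:
-- remove each completion from a copy of participant, then return the first
-- participant still present; objective: simpler (no speed claim).

-- ===== PORT A =====
-- Literal port of A. Under Pre_ the Python lookups `maraton[j]` (KeyError) and
-- `list(maraton.keys())[0]` (IndexError) never raise; the getD defaults below sit
-- exactly where those exceptions would be and are unreachable under Pre_.
def solution (participant : List String) (completion : List String) : String :=
  let maraton : PySem.Dict String Int :=
    participant.foldl (fun d i =>
      if d.contains i then d.insert i (d.getD i 0 + 1)   -- maraton[i] += 1
      else d.insert i 1)                                  -- maraton[i] = 1
      PySem.Dict.empty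
  let maraton2 : PySem.Dict String Int :=
    completion.foldl (fun d j =>
      if d.getD j 0 == 1 then d.erase j                   -- del maraton[j]
      else d.insert j (d.getD j 0 - 1))                   -- maraton[j] -= 1
      maraton
  (PySem.List.pyGet? (PySem.Dict.keys maraton2) 0).getD ""  -- list(maraton.keys())[0]

-- ===== PORT B =====
-- Literal port of Source B: leftovers.remove(name) raises ValueError when name is
-- absent (PySem.List.remove? = none there; the getD fallback is unreachable under
-- Pre_), and next(...) raises StopIteration when no one is left (the final getD
-- default, also unreachable under Pre_).
def solution_alt (participant : List String) (completion : List String) : String :=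
  let leftovers := completion.foldl
    (fun ls name => (PySem.List.remove? ls name).getD ls) participant
  (participant.find? (fun p => leftovers.contains p)).getD ""

-- ===== PRECONDITION & SPEC =====
-- Pre_ is exactly the set of inputs on which the Python A returns normally:
-- completion must be a sub-multiset of participant (else `maraton[j]` raises
-- KeyError) and someone must be left over (else `list(maraton.keys())[0]`
-- raises IndexError).
def Pre_solution (participant : List String) (completion : List String) : Prop :=
  (∀ j ∈ completion, completion.count j ≤ participant.count j) ∧
  (∃ x ∈ participant, completion.count x < participant.count x)
instance (participant : List String) (completion : List String) : Decidable (Pre_solution participant completion) := by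
  unfold Pre_solution; infer_instance

def pvWitness_solution : List String × List String := (["leo", "kiki", "eden"], ["eden", "kiki"])

def Spec_solution (participant : List String) (completion : List String) (out : String) : Prop := out = solution_alt participant completion
instance (participant : List String) (completion : List String) (out : String) : Decidable (Spec_solution participant completion out) := by unfold Spec_solution; infer_instance

-- ===== CLAIM (what is proved, stated in full; the proofs are below) =====
def Claim_equal_solution : Prop := ∀ (participant : List String) (completion : List String), Dom_solution participant completion → Pre_solution participant completion → Spec_solution participant completion (solution participant completion)

-- ===== LEMMAS AND PROOFS =====

-- keys of a dict whose items are the positive-count entries over S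
theorem pv_keys_shape (S : List String) (n : String → Int) :
    (S.filterMap (fun k => if 0 < n k then some (k, n k) else none)).map Prod.fst
      = S.filter (fun k => decide (0 < n k)) := by
  induction S with
  | nil => rfl
  | cons a S ih =>
    by_cases h : 0 < n a <;> simp [h, ih]

-- A's first loop is exactly PySem.Dict.counter
theorem pv_loop1_eq_counter (l : List String) :
    l.foldl (fun d i =>
        if d.contains i then d.insert i (d.getD i 0 + 1) else d.insert i 1)
      PySem.Dict.empty = PySem.Dict.counter l := by
  rw [PySem.Dict.counter_eq_foldl]
  apply PySem.List.foldl_congr_mem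
  intro d x _
  by_cases h : d.contains x
  · simp [h, PySem.Dict.modify]
  · simp only [h, Bool.false_eq_true, if_false, PySem.Dict.modify,
      PySem.Dict.getD_of_not_contains d 0 (by simpa using h), zero_add]

theorem pv_find?_filter_of_imp (q r : String → Bool) (l : List String)
    (h : ∀ y, q y = true → r y = true) : (l.filter r).find? q = l.find? q := by
  induction l with
  | nil => rfl
  | cons a l ih =>
    by_cases hr : r a = true
    · cases hq : q a <;> simp [hr, hq, ih]
    · have hq : q a = false := by
        cases hqa : q a
        · rfl
        · exact absurd (h a hqa) hr
      simp [hr, hq, ih]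

-- looking for the first match in set(l) (ordered dedup) = looking in l itself
theorem pv_find?_ofList (q : String → Bool) (l : List String) :
    (PySem.Set.ofList l).find? q = l.find? q := by
  induction l with
  | nil => rfl
  | cons a l ih =>
    rw [PySem.Set.ofList_cons]
    cases hq : q a
    · simp only [List.find?_cons, hq, PySem.Set.discard]
      rw [pv_find?_filter_of_imp q (fun y => !(y == a))]
      · exact ih
      · intro y hy
        have hya : y ≠ a := fun h => by subst h; rw [hy] at hq; cases hq
        simp [hya]
    · simp [hq]

-- the invariant of A's second loop: over a fixed nodup key list S the dict keeps,
-- in order, exactly the keys with positive remaining count, with that count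
theorem pv_loop2 (c : List String) (S : List String) (n : String → Int)
    (hS : S.Nodup) (hmem : ∀ j ∈ c, j ∈ S)
    (hcnt : ∀ j ∈ c, (c.count j : Int) ≤ n j) :
    (c.foldl (fun d j =>
        if d.getD j 0 == 1 then d.erase j else d.insert j (d.getD j 0 - 1))
      (PySem.Dict.mk (S.filterMap (fun k => if 0 < n k then some (k, n k) else none)))).items
    = S.filterMap (fun k =>
        if 0 < n k - c.count k then some (k, n k - c.count k) else none) := by
  induction c generalizing n with
  | nil => simp
  | cons j c ih =>
    have hjS : j ∈ S := hmem j List.mem_cons_self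
    have hj1 : (1 : Int) ≤ n j := by
      have h1 := hcnt j List.mem_cons_self
      have hc1 : 1 ≤ (j :: c).count j := List.count_pos_iff.mpr List.mem_cons_self
      omega
    have hitems : (j, n j) ∈ S.filterMap (fun k => if 0 < n k then some (k, n k) else none) :=
      List.mem_filterMap.mpr ⟨j, hjS, by simp [show (0:Int) < n j by omega]⟩
    have hkeysnd :
        (PySem.Dict.mk (S.filterMap (fun k => if 0 < n k then some (k, n k) else none))).keys.Nodup := by
      show ((S.filterMap (fun k => if 0 < n k then some (k, n k) else none)).map Prod.fst).Nodup
      rw [pv_keys_shape]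
      exact hS.filter _
    have hgetD :
        (PySem.Dict.mk (S.filterMap (fun k => if 0 < n k then some (k, n k) else none))).getD j 0 = n j :=
      PySem.Dict.getD_of_mem_items _ hitems hkeysnd 0
    have hstep : ∀ d' : PySem.Dict String Int,
        d'.items = S.filterMap (fun k =>
          if 0 < (if k = j then n k - 1 else n k) then some (k, if k = j then n k - 1 else n k) else none) →
        (c.foldl (fun d j =>
            if d.getD j 0 == 1 then d.erase j else d.insert j (d.getD j 0 - 1)) d').items
          = S.filterMap (fun k =>
              if 0 < n k - ((j :: c).count k : Int)
              then some (k, n k - ((j :: c).count k : Int)) else none) := by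
      intro d' hd'
      obtain rfl : d' = PySem.Dict.mk (S.filterMap (fun k =>
          if 0 < (if k = j then n k - 1 else n k) then some (k, if k = j then n k - 1 else n k) else none)) := by
        cases d'; simpa using hd'
      rw [ih (fun k => if k = j then n k - 1 else n k)
        (fun x hx => hmem x (List.mem_cons_of_mem _ hx))
        (by
          intro x hx
          have h1 := hcnt x (List.mem_cons_of_mem _ hx)
          by_cases hxj : x = j
          · have hcc : (j :: c).count x = c.count x + 1 := by
              rw [List.count_cons, if_pos (by simp [hxj])]
            simp only [if_pos hxj]
            omega
          · have hcc : (j :: c).count x = c.count x := by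
              rw [List.count_cons]
              simp [show ¬ (j == x) = true by simpa using fun h => hxj h.symm]
            simp only [if_neg hxj]
            omega)]
      apply List.filterMap_congr
      intro k _
      by_cases hkj : k = j
      · have hcc : (j :: c).count k = c.count k + 1 := by
          rw [List.count_cons, if_pos (by simp [hkj])]
        simp only [if_pos hkj, hcc]
        push_cast
        rw [sub_sub, add_comm (1 : Int) ((c.count k : Int))]
      · have hcc : (j :: c).count k = c.count k := by
          rw [List.count_cons]
          simp [show ¬ (j == k) = true by simpa using fun h => hkj h.symm]
        simp [hkj, hcc]
    simp only [List.foldl_cons]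
    rw [hgetD]
    by_cases hnj : n j = 1
    · rw [if_pos (by simp [hnj])]
      apply hstep
      show List.filter _ (S.filterMap (fun k => if 0 < n k then some (k, n k) else none)) = _
      rw [List.filter_filterMap]
      apply List.filterMap_congr
      intro k _
      by_cases hkj : k = j
      · simp [hkj, hnj, Option.filter]
      · by_cases h0 : 0 < n k
        · simp [hkj, h0, Option.filter, show ¬ (k == j) = true by simpa using hkj]
        · simp [hkj, h0]
    · rw [if_neg (by simp [hnj])]
      have hcont :
          (PySem.Dict.mk (S.filterMap (fun k => if 0 < n k then some (k, n k) else none))).contains j = true := by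
        rw [PySem.Dict.contains_iff_mem_keys]
        exact List.mem_map.mpr ⟨(j, n j), hitems, rfl⟩
      apply hstep
      rw [PySem.Dict.items_insert_of_contains _ _ hcont]
      show List.map _ (S.filterMap (fun k => if 0 < n k then some (k, n k) else none)) = _
      rw [List.map_filterMap]
      apply List.filterMap_congr
      intro k _
      by_cases hkj : k = j
      · have h2 : (1:Int) < n j := by omega
        simp [hkj, show (0:Int) < n j by omega, h2]
      · by_cases h0 : 0 < n k
        · simp [hkj, h0]
        · simp [hkj, h0]

-- B's removal loop computes exactly List.diff when completion is a sub-multiset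
theorem pv_leftovers (c : List String) (p : List String)
    (h : ∀ j ∈ c, c.count j ≤ p.count j) :
    c.foldl (fun ls name => (PySem.List.remove? ls name).getD ls) p = p.diff c := by
  induction c generalizing p with
  | nil => simp
  | cons j c ih =>
    have hjp : j ∈ p := by
      have h1 := h j List.mem_cons_self
      have hc1 : 1 ≤ (j :: c).count j := List.count_pos_iff.mpr List.mem_cons_self
      exact List.count_pos_iff.mp (by omega)
    rw [List.foldl_cons, PySem.List.remove?_eq_some_erase p j hjp, List.diff_cons]
    simp only [Option.getD_some]
    apply ih
    intro x hx
    have h1 := h x (List.mem_cons_of_mem _ hx)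
    rw [List.count_erase]
    by_cases hxj : j = x
    · have : (j :: c).count x = c.count x + 1 := by
        rw [List.count_cons, if_pos (by simp [hxj])]
      rw [if_pos (by simpa using hxj)]
      omega
    · have : (j :: c).count x = c.count x := by
        rw [List.count_cons]
        simp [show ¬ (j == x) = true by simpa using hxj]
      rw [if_neg (by simpa using hxj)]
      omega

-- ===== VERDICT (by name: the statement is the Claim_ definition above) =====
theorem solution_spec : Claim_equal_solution := by
  intro p c _ hpre
  obtain ⟨hsub, hex⟩ := hpre
  show solution p c = solution_alt p c
  have hmem : ∀ j ∈ c, j ∈ p := by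
    intro j hj
    have h1 : 1 ≤ c.count j := List.count_pos_iff.mpr hj
    exact List.count_pos_iff.mp (by have := hsub j hj; omega)
  -- the counter's items in the positive-count shape
  have hitems : (PySem.Dict.counter p).items
      = (PySem.Set.ofList p).filterMap
          (fun k => if 0 < (p.count k : Int) then some (k, (p.count k : Int)) else none) := by
    rw [PySem.Dict.items_counter]
    rw [← List.filterMap_eq_map, List.filterMap_congr]
    intro k hk
    have : 0 < p.count k := List.count_pos_iff.mpr ((PySem.Set.mem_ofList _ _).mp hk)
    simp only [Function.comp]
    rw [if_pos (by exact_mod_cast this)]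
  have hctr : PySem.Dict.counter p
      = PySem.Dict.mk ((PySem.Set.ofList p).filterMap
          (fun k => if 0 < (p.count k : Int) then some (k, (p.count k : Int)) else none)) :=
    PySem.Dict.ext hitems
  unfold solution
  dsimp only
  rw [pv_loop1_eq_counter, hctr]
  simp only [PySem.Dict.keys]
  rw [pv_loop2 c (PySem.Set.ofList p) _ (PySem.Set.nodup_ofList p)
      (fun j hj => (PySem.Set.mem_ofList _ _).mpr (hmem j hj))
      (fun j hj => by exact_mod_cast hsub j hj)]
  show (PySem.List.pyGet? (((PySem.Set.ofList p).filterMap _).map Prod.fst) 0).getD "" = _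
  rw [pv_keys_shape]
  have hq : ∀ x ∈ PySem.Set.ofList p,
      (decide (0 < (p.count x : Int) - (c.count x : Int)))
        = (decide (List.count x c < List.count x p)) := by
    intro x _
    rw [decide_eq_decide]
    omega
  rw [List.filter_congr hq]
  simp only [PySem.List.pyGet?, PySem.List.pyIdx?]
  norm_num
  rw [if_pos hex]
  simp only [Option.bind]
  rw [← List.head?_eq_getElem?, List.head?_filter, pv_find?_ofList]
  unfold solution_alt
  dsimp only
  rw [pv_leftovers c p hsub]
  have hpred : (fun x => (p.diff c).contains x)
      = (fun x => decide (List.count x c < List.count x p)) := by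
    funext x
    simp only [List.contains_eq_mem, decide_eq_decide]
    rw [← List.count_pos_iff, List.count_diff]
    omega
  rw [hpred]
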